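-- pv_equiv track=rewrite | github.com/KenMercusLai/checkio | AMSCO cipher.py | decode_amsco
-- ===== SOURCE A (Python) =====
-- def decode_amsco(message, key):
--     # create empty matrix
--     matrix = [[] for i in range(len(str(key)))]
--     i = 0
--     while i < len(message):
--         for j in range(len(str(key))):
--             if ((j % 2 != 0 and len(matrix[j]) % 2 == 0)
--                     or (j % 2 == 0 and len(matrix[j]) % 2 != 0)):
--                 if i + 2 <= len(message):
--                     matrix[j].append('  ')
--                     i += 2
--                 elif i + 1 <= len(message):
--                     matrix[j].append(' ')
--                     i += 1
--             else:
--                 if i + 1 <= len(message):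
--                     matrix[j].append(' ')
--                     i += 1
--
--     # fill the empty matrix
--     for i in range(1, len(str(key)) + 1):
--         column = matrix[str(key).index(str(i))]
--         for j in range(len(column)):
--             column[j] = message[:len(column[j])]
--             message = message[len(column[j]):]
--
--     # re-order by rows
--     OriginalMessage = ''
--     for i in range(max(map(len, matrix))):
--         OriginalMessage += ''.join([j[i] for j in matrix if i <= len(j) - 1])
--
--     return OriginalMessage
-- ===== SOURCE B (Python) =====
-- def decode_amsco(message, key):
--     k = str(key)
--     n = len(k)
--     L = len(message)
--     # 1. flat row-major list of (column, size) cells: size 2 iff (row+col) is odd,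
--     #    capped by what remains; stop once the ciphertext is exhausted
--     cells = []
--     used = 0
--     r = 0
--     while used < L:
--         for j in range(n):
--             if used < L:
--                 size = min(1 + (r + j) % 2, L - used)
--                 cells.append((j, size))
--                 used += size
--         r += 1
--     # 2. column totals, then each column's ciphertext start offset, in key-digit order
--     total = [0] * n
--     for j, size in cells:
--         total[j] += size
--     start = [0] * n
--     pos = 0
--     for d in range(1, n + 1):
--         j = k.index(str(d))
--         start[j] = pos
--         pos += total[j]
--     # 3. emit the cells in row-major order, advancing each column's cursor
--     out = []
--     for j, size in cells:
--         out.append(message[start[j]:start[j] + size])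
--         start[j] += size
--     return ''.join(out)
-- ===== Notes on version B (the rewrite author's own statement) =====
-- stated objective: faster
-- what changed: B replaces A's placeholder-string matrix (cells appended as ' '/' ' then rewritten while the ciphertext is repeatedly re-sliced with message = message[k:]) and its nested row-read comprehension by a flat row-major list of (column, size) integer cells from the parity rule (row+col odd = 2), integer column totals and start offsets, and a single pass that slices every cell straight out of the original ciphertext.
-- outside the precondition, e.g. on decode_amsco('abcdefghijklmnop', 1023456789): A returns 'o  cdefghijklmnp', B returns 'oabcdefghijklmnp'
import Mathlib
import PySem

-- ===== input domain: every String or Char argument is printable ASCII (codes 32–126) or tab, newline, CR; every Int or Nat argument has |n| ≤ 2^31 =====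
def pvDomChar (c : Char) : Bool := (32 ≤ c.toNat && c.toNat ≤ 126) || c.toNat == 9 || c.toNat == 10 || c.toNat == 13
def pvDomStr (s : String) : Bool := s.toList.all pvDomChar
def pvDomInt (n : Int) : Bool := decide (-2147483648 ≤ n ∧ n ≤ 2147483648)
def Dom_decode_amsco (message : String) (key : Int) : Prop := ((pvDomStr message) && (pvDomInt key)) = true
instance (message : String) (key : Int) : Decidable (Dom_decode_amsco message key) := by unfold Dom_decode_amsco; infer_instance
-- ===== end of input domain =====

-- B drops A's placeholder-string matrix, per-key-digit str.index lookups and repeated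
-- re-slicing of the message: it builds one flat row-major list of (column, size) cells,
-- computes each column's start offset by summing totals of key-smaller columns, and
-- emits every cell straight out of the original ciphertext (objective: faster).


-- ===== PORT A =====
-- One step of the inner 'for j in range(len(str(key)))' of the matrix-building while loop.
def aStep (L : Nat) (st : Nat × List (List (List Char))) (j : Nat) : Nat × List (List (List Char)) :=
  if (j % 2 ≠ 0 ∧ (st.2.getD j []).length % 2 = 0) ∨ (j % 2 = 0 ∧ (st.2.getD j []).length % 2 ≠ 0) then
    if st.1 + 2 ≤ L then (st.1 + 2, st.2.set j (st.2.getD j [] ++ [[' ', ' ']]))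
    else if st.1 + 1 ≤ L then (st.1 + 1, st.2.set j (st.2.getD j [] ++ [[' ']]))
    else st
  else
    if st.1 + 1 ≤ L then (st.1 + 1, st.2.set j (st.2.getD j [] ++ [[' ']]))
    else st

def aPass (L n : Nat) (st : Nat × List (List (List Char))) : Nat × List (List (List Char)) :=
  (List.range n).foldl (aStep L) st

-- 'while i < len(message)': fuel L+1 suffices, since each pass strictly increases i while i < L
-- (n = len(str(key)) ≥ 1, so column 0 always appends a cell while characters remain).
def aBuild (L n : Nat) : Nat → Nat × List (List (List Char)) → List (List (List Char))
  | 0, st => st.2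
  | fuel + 1, st => if st.1 < L then aBuild L n fuel (aPass L n st) else st.2

-- 'column[j] = message[:len(column[j])]; message = message[len(column[j]):]'
-- (message[:k] / message[k:] with 0 ≤ k are exactly take/drop: PySem.List.slice_to_natCast / slice_from_natCast).
def aFill1Step (p : List Char × List (List Char)) (j : Nat) : List Char × List (List Char) :=
  (p.1.drop ((p.2.getD j []).length), p.2.set j (p.1.take ((p.2.getD j []).length)))

-- 'for j in range(len(column)): …'
def aFill1 (msg : List Char) (col : List (List Char)) : List Char × List (List Char) :=
  (List.range col.length).foldl aFill1Step (msg, col)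

-- one step of 'for i in range(1, len(str(key)) + 1): column = matrix[str(key).index(str(i))]; …'
def aFillStep (ks : List Char) (p : List Char × List (List (List Char))) (d : Int) :
    List Char × List (List (List Char)) :=
  if PySem.Chars.find ks (PySem.Int.toStr d).toList = -1 then
    p  -- str.index raises ValueError here; excluded by Pre_decode_amsco
  else
    ((aFill1 p.1 (p.2.getD (PySem.Chars.find ks (PySem.Int.toStr d).toList).toNat [])).1,
     p.2.set (PySem.Chars.find ks (PySem.Int.toStr d).toList).toNat
       (aFill1 p.1 (p.2.getD (PySem.Chars.find ks (PySem.Int.toStr d).toList).toNat [])).2)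

def aFill (ks msg : List Char) (n : Nat) (m : List (List (List Char))) : List (List (List Char)) :=
  ((PySem.List.pyRange 1 ((n : Int) + 1) 1).foldl (aFillStep ks) (msg, m)).2

-- one row of "re-order by rows": OriginalMessage += ''.join([j[i] for j in matrix if i <= len(j) - 1])
def aRowStep (m : List (List (List Char))) (acc : List Char) (i : Nat) : List Char :=
  acc ++ ((m.filter (fun col => (i : Int) ≤ (col.length : Int) - 1)).map
    (fun col => col.getD i [])).flatten

-- 'for i in range(max(map(len, matrix))): …'
-- (the matrix is nonempty since len(str(key)) ≥ 1, so Python's max equals this running max from 0).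
def aRead (m : List (List (List Char))) : List Char :=
  (List.range ((m.map List.length).foldl Nat.max 0)).foldl (aRowStep m) []

def decode_amsco (message : String) (key : Int) : String :=
  let ks := (PySem.Int.toStr key).toList
  let n := ks.length
  let msg := message.toList
  let L := msg.length
  let m1 := aBuild L n (L + 1) (0, List.replicate n [])
  let m2 := aFill ks msg n m1
  String.ofList (aRead m2)

-- ===== PORT B =====
-- one step of B's inner 'for j in range(n)': append the cell (j, min(1 + (r+j) % 2, L - used))
-- to the flat row-major cell list and advance 'used', while ciphertext characters remain
def cellsStep (L r : Nat) (st : Nat × List (Nat × Nat)) (j : Nat) : Nat × List (Nat × Nat) :=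
  if st.1 < L then
    (st.1 + Nat.min (1 + (r + j) % 2) (L - st.1),
     st.2 ++ [(j, Nat.min (1 + (r + j) % 2) (L - st.1))])
  else st

-- 'while used < L': fuel L+1 suffices, each pass strictly increases 'used' while used < L
def cellsRows (L n : Nat) : Nat → Nat → Nat × List (Nat × Nat) → List (Nat × Nat)
  | 0, _, st => st.2
  | fuel + 1, r, st =>
    if st.1 < L then cellsRows L n fuel (r + 1) ((List.range n).foldl (cellsStep L r) st)
    else st.2

-- 'total = [0] * n; for j, size in cells: total[j] += size'
def bTotals (n : Nat) (cells : List (Nat × Nat)) : List Nat :=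
  cells.foldl (fun t c => t.set c.1 (t.getD c.1 0 + c.2)) (List.replicate n 0)

-- one step of 'for d in range(1, n + 1): j = k.index(str(d)); start[j] = pos; pos += total[j]'
def bStartStep (ks : List Char) (total : List Nat) (p : List Nat × Nat) (d : Int) :
    List Nat × Nat :=
  if PySem.Chars.find ks (PySem.Int.toStr d).toList = -1 then
    p  -- str.index raises ValueError here; excluded by Pre_decode_amsco
  else
    (p.1.set (PySem.Chars.find ks (PySem.Int.toStr d).toList).toNat p.2,
     p.2 + total.getD (PySem.Chars.find ks (PySem.Int.toStr d).toList).toNat 0)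

def bStarts (ks : List Char) (n : Nat) (total : List Nat) : List Nat :=
  ((PySem.List.pyRange 1 ((n : Int) + 1) 1).foldl (bStartStep ks total) (List.replicate n 0, 0)).1

-- 'out.append(message[start[j]:start[j] + size]); start[j] += size'
-- (the slice with nonnegative bounds is exactly drop/take)
def bEmitStep (msg : List Char) (p : List Nat × List (List Char)) (c : Nat × Nat) :
    List Nat × List (List Char) :=
  (p.1.set c.1 (p.1.getD c.1 0 + c.2), p.2 ++ [(msg.drop (p.1.getD c.1 0)).take c.2])

def decode_amsco_alt (message : String) (key : Int) : String :=
  let ks := (PySem.Int.toStr key).toList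
  let n := ks.length
  let msg := message.toList
  let L := msg.length
  let cells := cellsRows L n (L + 1) 0 (0, [])
  let start := bStarts ks n (bTotals n cells)
  String.ofList (cells.foldl (bEmitStep msg) (start, [])).2.flatten

-- ===== PRECONDITION & SPEC =====
-- Pre_ excludes keys whose decimal form is not a permutation of the digits 1..n (n = number of
-- characters): on those A raises ValueError — except for 10-character keys containing "10" as a
-- substring, on which str.index's substring match makes two key digits share a column and A
-- returns a string still containing placeholder spaces, an accident of A's implementation.
def Pre_decode_amsco (message : String) (key : Int) : Prop :=
  ((PySem.Int.toStr key).toList.length ≤ 9) ∧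
    ∀ d ∈ List.range (PySem.Int.toStr key).toList.length,
      Char.ofNat (49 + d) ∈ (PySem.Int.toStr key).toList
instance (message : String) (key : Int) : Decidable (Pre_decode_amsco message key) := by
  unfold Pre_decode_amsco; infer_instance

def pvWitness_decode_amsco : String × Int := ("attack at dawn", 4231)

def Spec_decode_amsco (message : String) (key : Int) (out : String) : Prop := out = decode_amsco_alt message key
instance (message : String) (key : Int) (out : String) : Decidable (Spec_decode_amsco message key out) := by unfold Spec_decode_amsco; infer_instance

-- ===== CLAIM (what is proved, stated in full; the proofs are below) =====
def Claim_equal_decode_amsco : Prop := ∀ (message : String) (key : Int), Dom_decode_amsco message key → Pre_decode_amsco message key → Spec_decode_amsco message key (decode_amsco message key)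

-- ===== LEMMAS AND PROOFS =====

-- proof-only intermediates: the cell-size grid, key-order offsets and row-by-row read
-- used to characterise BOTH ports (neither port computes with these)
def bStep (r : Nat) (st : Nat × List (List Nat)) (j : Nat) : Nat × List (List Nat) :=
  if 0 < st.1 then
    (st.1 - Nat.min (if (r + j) % 2 = 1 then 2 else 1) st.1,
     st.2.set j (st.2.getD j [] ++ [Nat.min (if (r + j) % 2 = 1 then 2 else 1) st.1]))
  else st

def bPass (n r : Nat) (st : Nat × List (List Nat)) : Nat × List (List Nat) :=
  (List.range n).foldl (bStep r) st

def bSizes (n : Nat) : Nat → Nat → Nat × List (List Nat) → List (List Nat)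
  | 0, _, st => st.2
  | fuel + 1, r, st => if 0 < st.1 then bSizes n fuel (r + 1) (bPass n r st) else st.2

def bOffStep (ks : List Char) (cols : List (List Nat)) (p : List Nat × Nat) (d : Int) :
    List Nat × Nat :=
  if PySem.Chars.find ks (PySem.Int.toStr d).toList = -1 then
    p
  else
    (p.1.set (PySem.Chars.find ks (PySem.Int.toStr d).toList).toNat p.2,
     p.2 + (cols.getD (PySem.Chars.find ks (PySem.Int.toStr d).toList).toNat []).sum)

def bOffsets (ks : List Char) (n : Nat) (cols : List (List Nat)) : List Nat :=
  ((PySem.List.pyRange 1 ((n : Int) + 1) 1).foldl (bOffStep ks cols) (List.replicate n 0, 0)).1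

def bCellStep (msg : List Char) (cols : List (List Nat)) (r : Nat)
    (p : List Nat × List (List Char)) (j : Nat) : List Nat × List (List Char) :=
  if r < (cols.getD j []).length then
    (p.1.set j (p.1.getD j 0 + (cols.getD j []).getD r 0),
     p.2 ++ [(msg.drop (p.1.getD j 0)).take ((cols.getD j []).getD r 0)])
  else p

def bRowStep (msg : List Char) (cols : List (List Nat)) (n : Nat)
    (p : List Nat × List (List Char)) (r : Nat) : List Nat × List (List Char) :=
  (List.range n).foldl (bCellStep msg cols r) p

def bRead (msg : List Char) (n : Nat) (cols : List (List Nat)) (off : List Nat) :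
    List (List Char) :=
  ((List.range ((cols.map List.length).foldl Nat.max 0)).foldl (bRowStep msg cols n) (off, [])).2

-- proof-only helpers
def mlen (m : List (List (List Char))) : List (List Nat) := m.map (fun c => c.map List.length)

def sliceCells : List Char → List Nat → List (List Char)
  | _, [] => []
  | s, l :: ls => s.take l :: sliceCells (s.drop l) ls

def pIdx (ks : List Char) (d : Int) : Nat :=
  (PySem.Chars.find ks (PySem.Int.toStr d).toList).toNat

theorem length_mlen (m : List (List (List Char))) : (mlen m).length = m.length := by
  simp [mlen]

theorem mlen_getD (m : List (List (List Char))) (j : Nat) :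
    (mlen m).getD j [] = (m.getD j []).map List.length := by
  rcases Nat.lt_or_ge j m.length with h | h
  · rw [List.getD_eq_getElem _ _ (by simpa [mlen] using h), List.getD_eq_getElem _ _ h]
    simp [mlen]
  · rw [List.getD_eq_default _ _ (by simpa [mlen] using h), List.getD_eq_default _ _ h]
    rfl

theorem mlen_set (m : List (List (List Char))) (j : Nat) (x : List (List Char)) :
    mlen (m.set j x) = (mlen m).set j (x.map List.length) := by
  simp [mlen, List.map_set]

theorem getD_set_self {α : Type} (l : List α) (j : Nat) (x d : α) (h : j < l.length) :
    (l.set j x).getD j d = x := by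
  rw [List.getD_eq_getElem _ _ (by simpa using h)]
  simp [List.getElem_set_self]

theorem getD_set_ne {α : Type} (l : List α) (j j' : Nat) (x d : α) (h : j' ≠ j) :
    (l.set j x).getD j' d = l.getD j' d := by
  rcases Nat.lt_or_ge j' l.length with h' | h'
  · rw [List.getD_eq_getElem _ _ (by simpa using h'), List.getD_eq_getElem _ _ h']
    rw [List.getElem_set_ne (by omega)]
  · rw [List.getD_eq_default _ _ (by simpa using h'), List.getD_eq_default _ _ h']

theorem sum_take_succ (l : List Nat) (r : Nat) (h : r < l.length) :
    (l.take (r + 1)).sum = (l.take r).sum + l.getD r 0 := by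
  rw [List.take_add_one, List.sum_append, List.getD_eq_getElem _ _ h]
  simp [List.getElem?_eq_getElem h]

theorem length_sliceCells (s : List Char) (ls : List Nat) :
    (sliceCells s ls).length = ls.length := by
  induction ls generalizing s with
  | nil => rfl
  | cons l ls ih => simp [sliceCells, ih]

theorem getD_sliceCells (s : List Char) (ls : List Nat) (r : Nat) (h : r < ls.length) :
    (sliceCells s ls).getD r [] = (s.drop ((ls.take r).sum)).take (ls.getD r 0) := by
  induction ls generalizing s r with
  | nil => simp at h
  | cons l ls ih =>
    cases r with
    | zero => simp [sliceCells]
    | succ r =>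
      have hr : r < ls.length := by simpa using h
      simp only [sliceCells, List.getD_cons_succ, List.take_succ_cons, List.sum_cons]
      rw [ih _ _ hr, List.drop_drop]

-- ===== phase 1: the size grid equals the cell lengths of A's placeholder matrix =====

theorem aStep_exhausted (L : Nat) (m : List (List (List Char))) (j : Nat) :
    aStep L (L, m) j = (L, m) := by
  have h2 : ¬ (L + 2 ≤ L) := by omega
  have h1 : ¬ (L + 1 ≤ L) := by omega
  simp [aStep, h1, h2]

theorem foldl_aStep_exhausted (L : Nat) (m : List (List (List Char))) :
    ∀ js : List Nat, js.foldl (aStep L) (L, m) = (L, m)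
  | [] => rfl
  | j :: js => by rw [List.foldl_cons, aStep_exhausted]; exact foldl_aStep_exhausted L m js

theorem bStep_zero (r : Nat) (c : List (List Nat)) (j : Nat) : bStep r (0, c) j = (0, c) := by
  simp [bStep]

theorem foldl_bStep_zero (r : Nat) (c : List (List Nat)) :
    ∀ js : List Nat, js.foldl (bStep r) (0, c) = (0, c)
  | [] => rfl
  | j :: js => by rw [List.foldl_cons, bStep_zero]; exact foldl_bStep_zero r c js

theorem pass_sim (L r : Nat) :
    ∀ js : List Nat, js.Nodup →
    ∀ (i : Nat) (m : List (List (List Char))),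
      (∀ j ∈ js, j < m.length) → i ≤ L →
      (∀ j ∈ js, (m.getD j []).length = r) →
      (js.foldl (bStep r) (L - i, mlen m)).1 = L - (js.foldl (aStep L) (i, m)).1 ∧
      (js.foldl (bStep r) (L - i, mlen m)).2 = mlen (js.foldl (aStep L) (i, m)).2 ∧
      (js.foldl (aStep L) (i, m)).1 ≤ L ∧
      (js.foldl (aStep L) (i, m)).2.length = m.length ∧
      (∀ j, j ∉ js → (js.foldl (aStep L) (i, m)).2.getD j [] = m.getD j []) ∧
      ((js.foldl (aStep L) (i, m)).1 = L ∨
        ∀ j ∈ js, ((js.foldl (aStep L) (i, m)).2.getD j []).length = r + 1) := by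
  intro js
  induction js with
  | nil =>
    intro _ i m _ hiL _
    exact ⟨rfl, rfl, hiL, rfl, fun _ _ => rfl, Or.inr (by simp)⟩
  | cons j js ih =>
    intro hnd i m hjm hiL hrow
    have hjjs : j ∉ js := (List.nodup_cons.mp hnd).1
    have hndt : js.Nodup := (List.nodup_cons.mp hnd).2
    by_cases hi : i < L
    · have hjlt : j < m.length := hjm j (List.mem_cons_self)
      have hcl : (m.getD j []).length = r := hrow j (List.mem_cons_self)
      have hlt : 0 < L - i := by omega
      obtain ⟨cell, t, hct, hit, hA1, hB1⟩ :
          ∃ (cell : List Char) (t : Nat), cell.length = t ∧ i + t ≤ L ∧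
            aStep L (i, m) j = (i + t, m.set j (m.getD j [] ++ [cell])) ∧
            bStep r (L - i, mlen m) j
              = (L - (i + t), (mlen m).set j ((mlen m).getD j [] ++ [t])) := by
        by_cases hpar : (r + j) % 2 = 1
        · have hcond : ((j % 2 ≠ 0 ∧ (m.getD j []).length % 2 = 0) ∨
              (j % 2 = 0 ∧ (m.getD j []).length % 2 ≠ 0)) := by rw [hcl]; omega
          by_cases h2 : i + 2 ≤ L
          · have hmin : Nat.min (if (r + j) % 2 = 1 then 2 else 1) (L - i) = 2 := by
              rw [if_pos hpar]; exact Nat.min_eq_left (by omega)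
            refine ⟨[' ', ' '], 2, rfl, h2, ?_, ?_⟩
            · unfold aStep; rw [if_pos hcond, if_pos h2]
            · unfold bStep; rw [if_pos hlt]
              refine Prod.ext_iff.mpr ⟨?_, ?_⟩
              · simp only []; rw [hmin]; omega
              · simp only []; rw [hmin]
          · have hmin : Nat.min (if (r + j) % 2 = 1 then 2 else 1) (L - i) = 1 := by
              rw [if_pos hpar, show L - i = 1 by omega]; decide
            refine ⟨[' '], 1, rfl, by omega, ?_, ?_⟩
            · unfold aStep; rw [if_pos hcond, if_neg h2, if_pos (show i + 1 ≤ L by omega)]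
            · unfold bStep; rw [if_pos hlt]
              refine Prod.ext_iff.mpr ⟨?_, ?_⟩
              · simp only []; rw [hmin]; omega
              · simp only []; rw [hmin]
        · have hcond : ¬ ((j % 2 ≠ 0 ∧ (m.getD j []).length % 2 = 0) ∨
              (j % 2 = 0 ∧ (m.getD j []).length % 2 ≠ 0)) := by rw [hcl]; omega
          have hmin : Nat.min (if (r + j) % 2 = 1 then 2 else 1) (L - i) = 1 := by
            rw [if_neg hpar]; exact Nat.min_eq_left (by omega)
          refine ⟨[' '], 1, rfl, by omega, ?_, ?_⟩
          · unfold aStep; rw [if_neg hcond, if_pos (show i + 1 ≤ L by omega)]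
          · unfold bStep; rw [if_pos hlt]
            refine Prod.ext_iff.mpr ⟨?_, ?_⟩
            · simp only []; rw [hmin]; omega
            · simp only []; rw [hmin]
      have hmlen' : mlen (m.set j (m.getD j [] ++ [cell]))
          = (mlen m).set j ((mlen m).getD j [] ++ [t]) := by
        rw [mlen_set, mlen_getD]; simp [hct]
      have h1 : ∀ j' ∈ js, j' < (m.set j (m.getD j [] ++ [cell])).length := by
        intro j' hj'; rw [List.length_set]; exact hjm j' (List.mem_cons_of_mem _ hj')
      have h3 : ∀ j' ∈ js, ((m.set j (m.getD j [] ++ [cell])).getD j' []).length = r := by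
        intro j' hj'
        rw [getD_set_ne _ _ _ _ _ (by rintro rfl; exact hjjs hj')]
        exact hrow j' (List.mem_cons_of_mem _ hj')
      obtain ⟨c1, c2, c3, c4, c5, c6⟩ :=
        ih hndt (i + t) (m.set j (m.getD j [] ++ [cell])) h1 hit h3
      rw [List.foldl_cons, List.foldl_cons, hA1, hB1, ← hmlen']
      refine ⟨c1, c2, c3, c4.trans (List.length_set ..), ?_, ?_⟩
      · intro j' hj'
        have hj'j : j' ≠ j := by intro h; exact hj' (h ▸ List.mem_cons_self)
        have hj'js : j' ∉ js := fun h => hj' (List.mem_cons_of_mem _ h)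
        rw [c5 j' hj'js, getD_set_ne _ _ _ _ _ hj'j]
      · rcases c6 with hL | hR
        · exact Or.inl hL
        · refine Or.inr ?_
          intro j'' hmem
          rcases List.mem_cons.mp hmem with rfl | hmem'
          · rw [c5 j'' hjjs, getD_set_self _ _ _ _ hjlt, List.length_append, hcl]; rfl
          · exact hR j'' hmem'
    · have hiL' : i = L := by omega
      subst hiL'
      rw [foldl_aStep_exhausted, Nat.sub_self, foldl_bStep_zero]
      exact ⟨by omega, rfl, le_refl _, rfl, fun _ _ => rfl, Or.inl rfl⟩

theorem loop_sim (L n : Nat) :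
    ∀ (fuel r i : Nat) (m : List (List (List Char))),
      m.length = n → i ≤ L →
      (i < L → ∀ j, j < n → (m.getD j []).length = r) →
      bSizes n fuel r (L - i, mlen m) = mlen (aBuild L n fuel (i, m)) ∧
      (aBuild L n fuel (i, m)).length = n := by
  intro fuel
  induction fuel with
  | zero => intro r i m hm _ _; exact ⟨rfl, hm⟩
  | succ f ih =>
    intro r i m hm hiL hrow
    by_cases hi : i < L
    · have hlt : 0 < L - i := by omega
      obtain ⟨c1, c2, c3, c4, c5, c6⟩ :=
        pass_sim L r (List.range n) (List.nodup_range)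
          i m (fun j hj => by rw [hm]; exact List.mem_range.mp hj) hiL
          (fun j hj => hrow hi j (List.mem_range.mp hj))
      have hstepA : aBuild L n (f + 1) (i, m)
          = aBuild L n f (List.foldl (aStep L) (i, m) (List.range n)) := by
        simp [aBuild, hi, aPass]
      have hstepB : bSizes n (f + 1) r (L - i, mlen m)
          = bSizes n f (r + 1) (bPass n r (L - i, mlen m)) := by
        simp [bSizes, hlt]
      have hpair : bPass n r (L - i, mlen m)
          = (L - (List.foldl (aStep L) (i, m) (List.range n)).1,
             mlen (List.foldl (aStep L) (i, m) (List.range n)).2) :=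
        Prod.ext_iff.mpr ⟨c1, c2⟩
      rw [hstepA, hstepB, hpair]
      apply ih (r + 1) (List.foldl (aStep L) (i, m) (List.range n)).1
        (List.foldl (aStep L) (i, m) (List.range n)).2
      · exact c4.trans hm
      · exact c3
      · intro hi' j hjn
        rcases c6 with hL | hR
        · exact absurd hL (by omega)
        · exact hR j (List.mem_range.mpr hjn)
    · have hnlt : ¬ 0 < L - i := by omega
      constructor
      · simp [bSizes, aBuild, hi, hnlt]
      · simp [aBuild, hi, hm]

-- ===== phase 2: A's filled matrix = cells sliced out of the ciphertext at key-order offsets =====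

theorem pIdx_def (ks : List Char) (d : Int) :
    (PySem.Chars.find ks (PySem.Int.toStr d).toList).toNat = pIdx ks d := rfl

theorem getD_append_cons {α : Type} (pre : List α) (c : α) (cs : List α) (d : α) :
    (pre ++ c :: cs).getD pre.length d = c := by
  rw [List.getD_eq_getElem _ _ (by simp)]
  rw [List.getElem_append_right (Nat.le_refl _)]
  simp

theorem set_append_cons {α : Type} (pre : List α) (c : α) (cs : List α) (x : α) :
    (pre ++ c :: cs).set pre.length x = pre ++ x :: cs := by
  induction pre with
  | nil => rfl
  | cons a as ih => simpa using ih

theorem fill1_go :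
    ∀ (suf pre : List (List Char)) (msg : List Char),
      (List.range' pre.length suf.length).foldl aFill1Step (msg, pre ++ suf)
        = (msg.drop ((suf.map List.length).sum), pre ++ sliceCells msg (suf.map List.length)) := by
  intro suf
  induction suf with
  | nil => intro pre msg; simp [sliceCells]
  | cons c cs ih =>
    intro pre msg
    rw [show (c :: cs).length = cs.length + 1 from rfl, List.range'_succ, List.foldl_cons]
    have hstep : aFill1Step (msg, pre ++ c :: cs) pre.length
        = (msg.drop c.length, (pre ++ [msg.take c.length]) ++ cs) := by
      unfold aFill1Step
      rw [getD_append_cons, set_append_cons]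
      simp
    rw [hstep, show pre.length + 1 = (pre ++ [msg.take c.length]).length by simp,
      show cs.length = ((c :: cs).length - 1 : Nat) from rfl]
    rw [show ((c :: cs).length - 1 : Nat) = cs.length from rfl]
    rw [ih (pre ++ [msg.take c.length]) (msg.drop c.length)]
    refine Prod.ext_iff.mpr ⟨?_, ?_⟩
    · rw [List.drop_drop]
      simp
    · simp [sliceCells]

theorem aFill1_spec (msg : List Char) (col : List (List Char)) :
    aFill1 msg col = (msg.drop ((col.map List.length).sum), sliceCells msg (col.map List.length)) := by
  have h := fill1_go col [] msg
  simpa [aFill1, List.range_eq_range'] using h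

theorem phase2_sim (ks msg0 : List Char) (S : List (List Nat)) :
    ∀ (ds : List Int) (pos : Nat) (m : List (List (List Char))) (off : List Nat),
      m.length = S.length → off.length = S.length →
      (∀ d ∈ ds, PySem.Chars.find ks (PySem.Int.toStr d).toList ≠ -1 ∧ pIdx ks d < S.length) →
      (ds.map (pIdx ks)).Nodup →
      (∀ d ∈ ds, (m.getD (pIdx ks d) []).map List.length = S.getD (pIdx ks d) []) →
      (ds.foldl (aFillStep ks) (msg0.drop pos, m)).2.length = m.length ∧
      (ds.foldl (bOffStep ks S) (off, pos)).1.length = off.length ∧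
      (∀ j, j ∉ ds.map (pIdx ks) →
        (ds.foldl (aFillStep ks) (msg0.drop pos, m)).2.getD j [] = m.getD j [] ∧
        (ds.foldl (bOffStep ks S) (off, pos)).1.getD j 0 = off.getD j 0) ∧
      (∀ d ∈ ds,
        (ds.foldl (aFillStep ks) (msg0.drop pos, m)).2.getD (pIdx ks d) [] =
          sliceCells (msg0.drop ((ds.foldl (bOffStep ks S) (off, pos)).1.getD (pIdx ks d) 0))
            (S.getD (pIdx ks d) [])) := by
  intro ds
  induction ds with
  | nil =>
    intro pos m off _ _ _ _ _
    exact ⟨rfl, rfl, fun _ _ => ⟨rfl, rfl⟩, by simp⟩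
  | cons d rest ih =>
    intro pos m off hm hoff hfind hnd hsz
    obtain ⟨hfd, hjd⟩ := hfind d List.mem_cons_self
    have hjm : pIdx ks d < m.length := by omega
    have hjo : pIdx ks d < off.length := by omega
    have hndc : (∀ x ∈ rest, ¬pIdx ks x = pIdx ks d) ∧ (rest.map (pIdx ks)).Nodup := by
      simpa using hnd
    have hdnotin : pIdx ks d ∉ rest.map (pIdx ks) := by
      intro hmem
      obtain ⟨x, hx, hxe⟩ := List.mem_map.mp hmem
      exact hndc.1 x hx hxe
    have hA1 : aFillStep ks (msg0.drop pos, m) d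
        = (msg0.drop (pos + (S.getD (pIdx ks d) []).sum),
           m.set (pIdx ks d) (sliceCells (msg0.drop pos) (S.getD (pIdx ks d) []))) := by
      unfold aFillStep
      rw [if_neg hfd]
      dsimp only
      simp only [pIdx_def]
      rw [aFill1_spec, hsz d List.mem_cons_self]
      refine Prod.ext_iff.mpr ⟨?_, rfl⟩
      rw [List.drop_drop]
    have hB1 : bOffStep ks S (off, pos) d
        = (off.set (pIdx ks d) pos, pos + (S.getD (pIdx ks d) []).sum) := by
      unfold bOffStep
      rw [if_neg hfd]
      dsimp only
      simp only [pIdx_def]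
    rw [List.foldl_cons, List.foldl_cons, hA1, hB1]
    obtain ⟨c1, c2, c3, c4⟩ :=
      ih (pos + (S.getD (pIdx ks d) []).sum)
        (m.set (pIdx ks d) (sliceCells (msg0.drop pos) (S.getD (pIdx ks d) [])))
        (off.set (pIdx ks d) pos)
        (by simpa using hm) (by simpa using hoff)
        (fun d' hd' => hfind d' (List.mem_cons_of_mem _ hd'))
        hndc.2
        (fun d' hd' => by
          rw [getD_set_ne _ _ _ _ _ (fun h => hndc.1 d' hd' h)]
          exact hsz d' (List.mem_cons_of_mem _ hd'))
    refine ⟨c1.trans (List.length_set ..), c2.trans (List.length_set ..), ?_, ?_⟩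
    · intro j hj
      have hj1 : j ≠ pIdx ks d := fun h => hj (h ▸ List.mem_cons_self)
      have hj2 : j ∉ rest.map (pIdx ks) := fun h => hj (List.mem_cons_of_mem _ h)
      obtain ⟨e1, e2⟩ := c3 j hj2
      exact ⟨e1.trans (getD_set_ne _ _ _ _ _ hj1), e2.trans (getD_set_ne _ _ _ _ _ hj1)⟩
    · intro d' hd'
      rcases List.mem_cons.mp hd' with rfl | hd''
      · obtain ⟨e1, e2⟩ := c3 (pIdx ks d') hdnotin
        rw [e1, e2, getD_set_self _ _ _ _ hjm, getD_set_self _ _ _ _ hjo]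
      · exact c4 d' hd''

-- ===== phase 3: A's row-by-row read = the grid read bRead =====

theorem inner_row (msg0 : List Char) (S : List (List Nat)) (base : List Nat)
    (M2 : List (List (List Char))) (hM2len : M2.length = S.length)
    (hM2 : ∀ j, j < S.length →
      M2.getD j [] = sliceCells (msg0.drop (base.getD j 0)) (S.getD j [])) (r : Nat) :
    ∀ (cnt k : Nat), k + cnt = S.length →
    ∀ (off : List Nat) (parts : List (List Char)),
      off.length = S.length →
      (∀ j, j < S.length →
        off.getD j 0 = base.getD j 0 + ((S.getD j []).take (if j < k then r + 1 else r)).sum) →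
      ((List.range' k cnt).foldl (bCellStep msg0 S r) (off, parts)).1.length = S.length ∧
      (∀ j, j < S.length →
        ((List.range' k cnt).foldl (bCellStep msg0 S r) (off, parts)).1.getD j 0
          = base.getD j 0 + ((S.getD j []).take (r + 1)).sum) ∧
      ((List.range' k cnt).foldl (bCellStep msg0 S r) (off, parts)).2
        = parts ++ ((M2.drop k).filter (fun col => (r : Int) ≤ (col.length : Int) - 1)).map
            (fun col => col.getD r []) := by
  intro cnt
  induction cnt with
  | zero =>
    intro k hk off parts hoff hinv
    have hdrop : M2.drop k = [] := List.drop_eq_nil_of_le (by omega)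
    simp only [List.range'_zero, List.foldl_nil]
    refine ⟨hoff, ?_, by simp [hdrop]⟩
    intro j hj
    have h := hinv j hj
    rw [if_pos (by omega : j < k)] at h
    exact h
  | succ cnt ih =>
    intro k hk off parts hoff hinv
    have hkS : k < S.length := by omega
    have hkM : k < M2.length := by omega
    rw [List.range'_succ, List.foldl_cons]
    have hdk : M2.drop k = M2.getD k [] :: M2.drop (k + 1) := by
      rw [List.drop_eq_getElem_cons hkM, List.getD_eq_getElem _ _ hkM]
    have hcol : M2.getD k [] = sliceCells (msg0.drop (base.getD k 0)) (S.getD k []) :=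
      hM2 k hkS
    have hcollen : (M2.getD k []).length = (S.getD k []).length := by
      rw [hcol, length_sliceCells]
    by_cases hg : r < (S.getD k []).length
    · have ho : off.getD k 0 = base.getD k 0 + ((S.getD k []).take r).sum := by
        have h := hinv k hkS
        rw [if_neg (lt_irrefl k)] at h
        exact h
      have hstep : bCellStep msg0 S r (off, parts) k
          = (off.set k (off.getD k 0 + (S.getD k []).getD r 0),
             parts ++ [(msg0.drop (off.getD k 0)).take ((S.getD k []).getD r 0)]) := by
        unfold bCellStep
        rw [if_pos hg]
      rw [hstep]
      obtain ⟨c1, c2, c3⟩ := ih (k + 1) (by omega)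
        (off.set k (off.getD k 0 + (S.getD k []).getD r 0))
        (parts ++ [(msg0.drop (off.getD k 0)).take ((S.getD k []).getD r 0)])
        (by simpa using hoff)
        (by
          intro j hj
          by_cases hjk : j = k
          · subst hjk
            rw [getD_set_self _ _ _ _ (by omega), if_pos (by omega : j < j + 1), ho,
              sum_take_succ _ _ hg, Nat.add_assoc]
          · rw [getD_set_ne _ _ _ _ _ hjk]
            have h := hinv j hj
            by_cases hjk' : j < k
            · rw [if_pos hjk'] at h
              rw [if_pos (by omega : j < k + 1)]
              exact h
            · rw [if_neg hjk'] at h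
              rw [if_neg (by omega : ¬ j < k + 1)]
              exact h)
      refine ⟨c1, c2, ?_⟩
      rw [c3, hdk, List.filter_cons,
        if_pos (by
          simp only [decide_eq_true_eq]
          rw [hcollen]
          omega)]
      rw [List.map_cons]
      have hcell : (M2.getD k []).getD r []
          = (msg0.drop (off.getD k 0)).take ((S.getD k []).getD r 0) := by
        rw [hcol, getD_sliceCells _ _ _ hg, List.drop_drop, ← ho]
      rw [hcell]
      simp
    · have hstep : bCellStep msg0 S r (off, parts) k = (off, parts) := by
        unfold bCellStep
        rw [if_neg hg]
      rw [hstep]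
      obtain ⟨c1, c2, c3⟩ := ih (k + 1) (by omega) off parts hoff
        (by
          intro j hj
          have h := hinv j hj
          by_cases hjk : j = k
          · subst hjk
            rw [if_neg (lt_irrefl j)] at h
            rw [if_pos (by omega : j < j + 1), h,
              List.take_of_length_le (by omega), List.take_of_length_le (by omega)]
          · by_cases hjk' : j < k
            · rw [if_pos hjk'] at h
              rw [if_pos (by omega : j < k + 1)]
              exact h
            · rw [if_neg hjk'] at h
              rw [if_neg (by omega : ¬ j < k + 1)]
              exact h)
      refine ⟨c1, c2, ?_⟩
      rw [c3, hdk, List.filter_cons,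
        if_neg (by
          simp only [decide_eq_true_eq]
          rw [hcollen]
          omega)]

theorem rows_sim (msg0 : List Char) (S : List (List Nat)) (base : List Nat)
    (M2 : List (List (List Char))) (hM2len : M2.length = S.length)
    (hM2 : ∀ j, j < S.length →
      M2.getD j [] = sliceCells (msg0.drop (base.getD j 0)) (S.getD j []))
    (hbase : base.length = S.length) :
    ∀ K : Nat,
      (List.range K).foldl (aRowStep M2) []
        = ((List.range K).foldl (bRowStep msg0 S S.length) (base, [])).2.flatten ∧
      ((List.range K).foldl (bRowStep msg0 S S.length) (base, [])).1.length = S.length ∧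
      (∀ j, j < S.length →
        ((List.range K).foldl (bRowStep msg0 S S.length) (base, [])).1.getD j 0
          = base.getD j 0 + ((S.getD j []).take K).sum) := by
  intro K
  induction K with
  | zero => exact ⟨rfl, hbase, fun j hj => by simp⟩
  | succ K ihK =>
    obtain ⟨r1, r2, r3⟩ := ihK
    obtain ⟨i1, i2, i3⟩ := inner_row msg0 S base M2 hM2len hM2 K S.length 0 (by omega)
      ((List.range K).foldl (bRowStep msg0 S S.length) (base, [])).1
      ((List.range K).foldl (bRowStep msg0 S S.length) (base, [])).2
      r2
      (by
        intro j hj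
        rw [if_neg (Nat.not_lt_zero j)]
        exact r3 j hj)
    simp only [List.range_succ, List.foldl_append, List.foldl_cons, List.foldl_nil]
    have hrow : bRowStep msg0 S S.length
        ((List.range K).foldl (bRowStep msg0 S S.length) (base, [])) K
        = (List.range' 0 S.length).foldl (bCellStep msg0 S K)
            (((List.range K).foldl (bRowStep msg0 S S.length) (base, [])).1,
             ((List.range K).foldl (bRowStep msg0 S S.length) (base, [])).2) := by
      unfold bRowStep
      rw [List.range_eq_range']
    rw [hrow]
    refine ⟨?_, i1, i2⟩
    rw [r1, i3]
    unfold aRowStep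
    simp [List.flatten_append]

-- ===== key-digit facts =====

theorem toStr_digit (d : Int) (h1 : 1 ≤ d) (h9 : d ≤ 9) :
    (PySem.Int.toStr d).toList = [Char.ofNat (48 + d.toNat)] := by
  interval_cases d <;> decide

theorem charval_digit (k : Nat) (hk : k ≤ 9) : (Char.ofNat (48 + k)).toNat = 48 + k := by
  interval_cases k <;> decide

theorem key_mem (ks : List Char) :
    ∀ d ∈ PySem.List.pyRange 1 ((ks.length : Int) + 1) 1, 1 ≤ d ∧ d ≤ (ks.length : Int) := by
  intro d hd
  have h := (PySem.List.mem_pyRange_one).mp hd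
  omega

theorem key_sub (ks : List Char) (hn9 : ks.length ≤ 9) :
    ∀ d ∈ PySem.List.pyRange 1 ((ks.length : Int) + 1) 1,
      (PySem.Int.toStr d).toList = [Char.ofNat (48 + d.toNat)] := by
  intro d hd
  obtain ⟨h1, h2⟩ := key_mem ks d hd
  exact toStr_digit d h1 (by omega)

theorem key_find (ks : List Char) (hn9 : ks.length ≤ 9)
    (hdig : ∀ k ∈ List.range ks.length, Char.ofNat (49 + k) ∈ ks) :
    ∀ d ∈ PySem.List.pyRange 1 ((ks.length : Int) + 1) 1,
      PySem.Chars.find ks (PySem.Int.toStr d).toList ≠ -1 := by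
  intro d hd
  obtain ⟨h1, h2⟩ := key_mem ks d hd
  have hk : d.toNat - 1 ∈ List.range ks.length := List.mem_range.mpr (by omega)
  have hcm := hdig _ hk
  rw [show 49 + (d.toNat - 1) = 48 + d.toNat by omega] at hcm
  rw [key_sub ks hn9 d hd, Ne, PySem.Chars.find_eq_neg_one_iff]
  intro hni
  exact hni ((List.singleton_infix_iff _ _).mpr hcm)

theorem key_at (ks : List Char) (hn9 : ks.length ≤ 9)
    (hdig : ∀ k ∈ List.range ks.length, Char.ofNat (49 + k) ∈ ks) :
    ∀ d ∈ PySem.List.pyRange 1 ((ks.length : Int) + 1) 1,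
      pIdx ks d < ks.length ∧ ks[pIdx ks d]? = some (Char.ofNat (48 + d.toNat)) := by
  intro d hd
  have hf := key_find ks hn9 hdig d hd
  have h0 : 0 ≤ PySem.Chars.find ks (PySem.Int.toStr d).toList := by
    have := PySem.Chars.neg_one_le_find ks (PySem.Int.toStr d).toList
    omega
  obtain ⟨t, ht⟩ := (PySem.Chars.find_spec h0).1
  have hsome : ks[pIdx ks d]? = some (Char.ofNat (48 + d.toNat)) := by
    have hg : (ks.drop ((PySem.Chars.find ks (PySem.Int.toStr d).toList).toNat))[0]?
        = ks[(PySem.Chars.find ks (PySem.Int.toStr d).toList).toNat + 0]? :=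
      List.getElem?_drop
    rw [← ht, key_sub ks hn9 d hd] at hg
    unfold pIdx
    rw [key_sub ks hn9 d hd]
    simpa using hg.symm
  exact ⟨(List.getElem?_eq_some_iff.mp hsome).1, hsome⟩

theorem key_inj (ks : List Char) (hn9 : ks.length ≤ 9)
    (hdig : ∀ k ∈ List.range ks.length, Char.ofNat (49 + k) ∈ ks) :
    ∀ d1 ∈ PySem.List.pyRange 1 ((ks.length : Int) + 1) 1,
    ∀ d2 ∈ PySem.List.pyRange 1 ((ks.length : Int) + 1) 1,
      pIdx ks d1 = pIdx ks d2 → d1 = d2 := by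
  intro d1 hd1 d2 hd2 he
  have h1 := (key_at ks hn9 hdig d1 hd1).2
  have h2 := (key_at ks hn9 hdig d2 hd2).2
  rw [he, h2] at h1
  have hv := congrArg Char.toNat (Option.some.inj h1)
  obtain ⟨g1, g2⟩ := key_mem ks d1 hd1
  obtain ⟨g3, g4⟩ := key_mem ks d2 hd2
  rw [charval_digit d1.toNat (by omega), charval_digit d2.toNat (by omega)] at hv
  omega

theorem key_nodup (ks : List Char) (hn9 : ks.length ≤ 9)
    (hdig : ∀ k ∈ List.range ks.length, Char.ofNat (49 + k) ∈ ks) :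
    ((PySem.List.pyRange 1 ((ks.length : Int) + 1) 1).map (pIdx ks)).Nodup :=
  (List.nodup_map_iff_inj_on (PySem.List.nodup_pyRange_one _ _)).mpr (key_inj ks hn9 hdig)

theorem key_surj (ks : List Char) (hn9 : ks.length ≤ 9)
    (hdig : ∀ k ∈ List.range ks.length, Char.ofNat (49 + k) ∈ ks) :
    ∀ j, j < ks.length →
      ∃ d ∈ PySem.List.pyRange 1 ((ks.length : Int) + 1) 1, pIdx ks d = j := by
  intro j hj
  have hdslen : (PySem.List.pyRange 1 ((ks.length : Int) + 1) 1).length = ks.length := by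
    rw [PySem.List.length_pyRange_one]
    simp
  have hfsub : ((PySem.List.pyRange 1 ((ks.length : Int) + 1) 1).map (pIdx ks)).toFinset
      ⊆ Finset.range ks.length := by
    intro x hx
    rw [List.mem_toFinset] at hx
    obtain ⟨d, hd, rfl⟩ := List.mem_map.mp hx
    exact Finset.mem_range.mpr (key_at ks hn9 hdig d hd).1
  have hfeq := Finset.eq_of_subset_of_card_le hfsub
    (by rw [List.toFinset_card_of_nodup (key_nodup ks hn9 hdig), List.length_map, hdslen,
      Finset.card_range])
  have hjmem : j ∈ ((PySem.List.pyRange 1 ((ks.length : Int) + 1) 1).map (pIdx ks)).toFinset := by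
    rw [hfeq]
    exact Finset.mem_range.mpr hj
  rw [List.mem_toFinset] at hjmem
  obtain ⟨d, hd, he⟩ := List.mem_map.mp hjmem
  exact ⟨d, hd, he⟩

-- A's output characterised through the grid/offset/row-read intermediates
theorem main_eq (ks msg0 : List Char) (hn9 : ks.length ≤ 9)
    (hdig : ∀ k ∈ List.range ks.length, Char.ofNat (49 + k) ∈ ks) :
    aRead (aFill ks msg0 ks.length
        (aBuild msg0.length ks.length (msg0.length + 1) (0, List.replicate ks.length [])))
      = (bRead msg0 ks.length
          (bSizes ks.length (msg0.length + 1) 0 (msg0.length, List.replicate ks.length []))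
          (bOffsets ks ks.length
            (bSizes ks.length (msg0.length + 1) 0 (msg0.length, List.replicate ks.length [])))).flatten := by
  -- phase 1
  obtain ⟨hS, hM1len⟩ := loop_sim msg0.length ks.length (msg0.length + 1) 0 0
    (List.replicate ks.length []) (by simp) (Nat.zero_le _)
    (fun _ j hj => by
      rw [List.getD_eq_getElem _ _ (by simpa using hj)]
      simp)
  rw [Nat.sub_zero, show mlen (List.replicate ks.length []) = List.replicate ks.length [] by
    simp [mlen]] at hS
  have hSlen : (bSizes ks.length (msg0.length + 1) 0
      (msg0.length, List.replicate ks.length [])).length = ks.length := by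
    rw [hS, length_mlen, hM1len]
  -- digit/key facts
  have hmem := key_mem ks
  have hsub := key_sub ks hn9
  have hfind := key_find ks hn9 hdig
  have hat := key_at ks hn9 hdig
  have hnodup := key_nodup ks hn9 hdig
  have hsurj := key_surj ks hn9 hdig
  -- phase 2
  obtain ⟨p1, p2, p3, p4⟩ := phase2_sim ks msg0
    (bSizes ks.length (msg0.length + 1) 0 (msg0.length, List.replicate ks.length []))
    (PySem.List.pyRange 1 ((ks.length : Int) + 1) 1) 0
    (aBuild msg0.length ks.length (msg0.length + 1) (0, List.replicate ks.length []))
    (List.replicate ks.length 0)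
    (by rw [hSlen, hM1len]) (by rw [hSlen, List.length_replicate])
    (fun d hd => ⟨hfind d hd, by rw [hSlen]; exact (hat d hd).1⟩)
    hnodup
    (fun d hd => by rw [hS, mlen_getD])
  rw [List.drop_zero] at p1 p3 p4
  -- phase 3
  have hM2len : (aFill ks msg0 ks.length
      (aBuild msg0.length ks.length (msg0.length + 1) (0, List.replicate ks.length []))).length
      = (bSizes ks.length (msg0.length + 1) 0 (msg0.length, List.replicate ks.length [])).length := by
    rw [hSlen]
    exact p1.trans hM1len
  have hM2 : ∀ j, j < (bSizes ks.length (msg0.length + 1) 0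
        (msg0.length, List.replicate ks.length [])).length →
      (aFill ks msg0 ks.length
          (aBuild msg0.length ks.length (msg0.length + 1) (0, List.replicate ks.length []))).getD j []
        = sliceCells (msg0.drop ((bOffsets ks ks.length
            (bSizes ks.length (msg0.length + 1) 0 (msg0.length, List.replicate ks.length []))).getD j 0))
          ((bSizes ks.length (msg0.length + 1) 0 (msg0.length, List.replicate ks.length [])).getD j []) := by
    intro j hj
    obtain ⟨d, hd, rfl⟩ := hsurj j (by rw [← hSlen]; exact hj)
    exact p4 d hd
  have hofflen : (bOffsets ks ks.length
      (bSizes ks.length (msg0.length + 1) 0 (msg0.length, List.replicate ks.length []))).length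
      = (bSizes ks.length (msg0.length + 1) 0 (msg0.length, List.replicate ks.length [])).length := by
    rw [hSlen]
    exact p2.trans (List.length_replicate)
  obtain ⟨r1, r2, r3⟩ := rows_sim msg0
    (bSizes ks.length (msg0.length + 1) 0 (msg0.length, List.replicate ks.length []))
    (bOffsets ks ks.length
      (bSizes ks.length (msg0.length + 1) 0 (msg0.length, List.replicate ks.length [])))
    (aFill ks msg0 ks.length
      (aBuild msg0.length ks.length (msg0.length + 1) (0, List.replicate ks.length [])))
    hM2len hM2 hofflen
    (((bSizes ks.length (msg0.length + 1) 0 (msg0.length, List.replicate ks.length [])).map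
      List.length).foldl Nat.max 0)
  have hml : (aFill ks msg0 ks.length
      (aBuild msg0.length ks.length (msg0.length + 1) (0, List.replicate ks.length []))).map List.length
      = (bSizes ks.length (msg0.length + 1) 0 (msg0.length, List.replicate ks.length [])).map
          List.length := by
    apply List.ext_getElem (by rw [List.length_map, List.length_map, hM2len])
    intro j h1 h2
    rw [List.getElem_map, List.getElem_map]
    have hj : j < (bSizes ks.length (msg0.length + 1) 0
        (msg0.length, List.replicate ks.length [])).length := by simpa using h2
    rw [← List.getD_eq_getElem _ [] (by simpa using h1), hM2 j hj, length_sliceCells,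
      List.getD_eq_getElem _ [] hj]
  unfold aRead bRead
  rw [hSlen] at r1
  rw [hml]
  exact r1

-- ===== B-side bridges: B's flat cells / totals / starts / emit equal the same intermediates =====

-- row r of the grid, as flat (column, size) cells
def rowOf (S : List (List Nat)) (n r : Nat) : List (Nat × Nat) :=
  (List.range n).filterMap (fun j =>
    if r < (S.getD j []).length then some (j, (S.getD j []).getD r 0) else none)

def maxLen (S : List (List Nat)) : Nat := (S.map List.length).foldl Nat.max 0

-- generic helpers for the B-side bridges
theorem getD_append_left {α : Type} (l l' : List α) (k : Nat) (d : α) (h : k < l.length) :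
    (l ++ l').getD k d = l.getD k d := by
  rw [List.getD_eq_getElem _ _ (by simp; omega), List.getD_eq_getElem _ _ h,
    List.getElem_append_left h]

theorem foldl_max_init_le (l : List Nat) : ∀ a, a ≤ l.foldl Nat.max a := by
  induction l with
  | nil => intro a; exact le_refl a
  | cons x t ih => intro a; exact le_trans (Nat.le_max_left a x) (ih (Nat.max a x))

theorem le_foldl_max (l : List Nat) (x : Nat) (hx : x ∈ l) : ∀ a, x ≤ l.foldl Nat.max a := by
  induction l with
  | nil => cases hx
  | cons y t ih =>
    intro a
    rcases List.mem_cons.mp hx with rfl | hm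
    · exact le_trans (Nat.le_max_right a x) (foldl_max_init_le t (Nat.max a x))
    · exact ih hm (Nat.max a y)

theorem foldl_max_le (l : List Nat) (b : Nat) (hall : ∀ x ∈ l, x ≤ b) :
    ∀ a, a ≤ b → l.foldl Nat.max a ≤ b := by
  induction l with
  | nil => intro a ha; exact ha
  | cons y t ih =>
    intro a ha
    exact ih (fun x hx => hall x (List.mem_cons_of_mem _ hx)) (Nat.max a y)
      (Nat.max_le.mpr ⟨ha, hall y List.mem_cons_self⟩)

theorem getD_length_le_maxLen (S : List (List Nat)) (j : Nat) (hj : j < S.length) :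
    (S.getD j []).length ≤ maxLen S := by
  apply le_foldl_max
  rw [List.getD_eq_getElem _ _ hj]
  exact List.mem_map.mpr ⟨S[j], List.getElem_mem hj, rfl⟩

theorem maxLen_le (S : List (List Nat)) (b : Nat)
    (h : ∀ j, j < S.length → (S.getD j []).length ≤ b) : maxLen S ≤ b := by
  apply foldl_max_le _ _ _ 0 (Nat.zero_le b)
  intro x hx
  obtain ⟨col, hcol, rfl⟩ := List.mem_map.mp hx
  obtain ⟨j, hj, rfl⟩ := List.getElem_of_mem hcol
  rw [← List.getD_eq_getElem _ [] hj]
  exact h j hj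

-- the extension property of the grid builder: it only appends to columns
theorem getD_set_append {α : Type} (l : List (List α)) (j0 j : Nat) (x : List α) :
    ∃ suf, (l.set j0 (l.getD j0 [] ++ x)).getD j [] = l.getD j [] ++ suf := by
  by_cases hj : j = j0
  · subst hj
    by_cases hlt : j < l.length
    · exact ⟨x, getD_set_self _ _ _ _ hlt⟩
    · refine ⟨[], ?_⟩
      rw [List.getD_eq_default _ _ (by simpa using Nat.le_of_not_lt hlt),
        List.getD_eq_default _ _ (Nat.le_of_not_lt hlt), List.append_nil]
  · exact ⟨[], by rw [getD_set_ne _ _ _ _ _ hj, List.append_nil]⟩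

theorem foldl_bStep_ext (r : Nat) :
    ∀ (js : List Nat) (st : Nat × List (List Nat)),
      (js.foldl (bStep r) st).2.length = st.2.length ∧
      ∀ j, ∃ suf, (js.foldl (bStep r) st).2.getD j [] = st.2.getD j [] ++ suf := by
  intro js
  induction js with
  | nil => intro st; exact ⟨rfl, fun j => ⟨[], (List.append_nil _).symm⟩⟩
  | cons j0 t ih =>
    intro st
    have hstep : (bStep r st j0).2.length = st.2.length ∧
        ∀ j, ∃ suf, (bStep r st j0).2.getD j [] = st.2.getD j [] ++ suf := by
      unfold bStep
      by_cases h : 0 < st.1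
      · rw [if_pos h]
        exact ⟨List.length_set .., fun j => getD_set_append st.2 j0 j _⟩
      · rw [if_neg h]
        exact ⟨rfl, fun j => ⟨[], (List.append_nil _).symm⟩⟩
    obtain ⟨ih1, ih2⟩ := ih (bStep r st j0)
    refine ⟨by rw [List.foldl_cons, ih1, hstep.1], ?_⟩
    intro j
    obtain ⟨s1, hs1⟩ := hstep.2 j
    obtain ⟨s2, hs2⟩ := ih2 j
    exact ⟨s1 ++ s2, by rw [List.foldl_cons, hs2, hs1, List.append_assoc]⟩

theorem bSizes_ext (n : Nat) :
    ∀ (fuel r : Nat) (st : Nat × List (List Nat)),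
      (bSizes n fuel r st).length = st.2.length ∧
      ∀ j, ∃ suf, (bSizes n fuel r st).getD j [] = st.2.getD j [] ++ suf := by
  intro fuel
  induction fuel with
  | zero => intro r st; exact ⟨rfl, fun j => ⟨[], (List.append_nil _).symm⟩⟩
  | succ f ih =>
    intro r st
    by_cases h : 0 < st.1
    · have hrec : bSizes n (f + 1) r st = bSizes n f (r + 1) (bPass n r st) := by
        simp [bSizes, h]
      obtain ⟨p1, p2⟩ := foldl_bStep_ext r (List.range n) st
      obtain ⟨i1, i2⟩ := ih (r + 1) (bPass n r st)
      refine ⟨by rw [hrec, i1]; exact p1, ?_⟩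
      intro j
      obtain ⟨s1, hs1⟩ := p2 j
      obtain ⟨s2, hs2⟩ := i2 j
      exact ⟨s1 ++ s2, by rw [hrec, hs2]; unfold bPass; rw [hs1, List.append_assoc]⟩
    · refine ⟨by simp [bSizes, h], fun j => ⟨[], ?_⟩⟩
      simp only [bSizes, if_neg h]
      exact (List.append_nil _).symm

-- the totals fold: entry j accumulates the sizes of the cells of column j
theorem tot_len (cells : List (Nat × Nat)) :
    ∀ t : List Nat,
      (cells.foldl (fun t c => t.set c.1 (t.getD c.1 0 + c.2)) t).length = t.length := by
  induction cells with
  | nil => intro t; rfl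
  | cons c rest ih => intro t; rw [List.foldl_cons, ih]; exact List.length_set ..

theorem tot_getD (j : Nat) :
    ∀ (cells : List (Nat × Nat)) (t : List Nat), j < t.length →
      (cells.foldl (fun t c => t.set c.1 (t.getD c.1 0 + c.2)) t).getD j 0
        = t.getD j 0 + ((cells.filter (fun c => c.1 == j)).map Prod.snd).sum := by
  intro cells
  induction cells with
  | nil => intro t _; simp
  | cons c rest ih =>
    intro t hj
    rw [List.foldl_cons, List.filter_cons]
    by_cases hc : c.1 = j
    · rw [if_pos (by simpa using hc)]
      rw [ih _ (by rw [List.length_set]; exact hj), hc, getD_set_self _ _ _ _ hj]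
      simp [Nat.add_assoc]
    · rw [if_neg (by simpa using hc)]
      rw [ih _ (by rw [List.length_set]; exact hj), getD_set_ne _ _ _ _ _ (Ne.symm hc)]

theorem filter_rowOf_aux (S : List (List Nat)) (r j : Nat) :
    ∀ js : List Nat, js.Nodup →
      ((js.filterMap (fun j' =>
          if r < (S.getD j' []).length then some (j', (S.getD j' []).getD r 0) else none)).filter
        (fun c => c.1 == j))
      = if j ∈ js ∧ r < (S.getD j []).length then [(j, (S.getD j []).getD r 0)] else [] := by
  intro js
  induction js with
  | nil => intro _; simp
  | cons j0 t ih =>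
    intro hnd
    have hj0t : j0 ∉ t := (List.nodup_cons.mp hnd).1
    have ihr := ih (List.nodup_cons.mp hnd).2
    rw [List.filterMap_cons]
    by_cases hg : r < (S.getD j0 []).length
    · rw [if_pos hg, List.filter_cons]
      by_cases hj : j0 = j
      · subst hj
        rw [if_pos (by simp), ihr, if_neg (by simp [hj0t]),
          if_pos ⟨List.mem_cons_self, hg⟩]
      · rw [if_neg (by simpa using hj), ihr]
        by_cases hm : j ∈ t ∧ r < (S.getD j []).length
        · rw [if_pos hm, if_pos ⟨List.mem_cons_of_mem _ hm.1, hm.2⟩]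
        · rw [if_neg hm, if_neg (by
            intro h
            exact hm ⟨(List.mem_cons.mp h.1).resolve_left (fun e => hj e.symm), h.2⟩)]
    · rw [if_neg hg, ihr]
      by_cases hj : j0 = j
      · subst hj
        rw [if_neg (by simp [hj0t]), if_neg (by intro h; exact hg h.2)]
      · by_cases hm : j ∈ t ∧ r < (S.getD j []).length
        · rw [if_pos hm, if_pos ⟨List.mem_cons_of_mem _ hm.1, hm.2⟩]
        · rw [if_neg hm, if_neg (by
            intro h
            exact hm ⟨(List.mem_cons.mp h.1).resolve_left (fun e => hj e.symm), h.2⟩)]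

theorem colSum_rows (S : List (List Nat)) (n j : Nat) (hj : j < n) :
    ∀ K : Nat,
      ((((List.range K).flatMap (rowOf S n)).filter (fun c => c.1 == j)).map Prod.snd).sum
        = ((S.getD j []).take K).sum := by
  intro K
  induction K with
  | zero => simp
  | succ K ih =>
    rw [List.range_succ, List.flatMap_append, List.filter_append, List.map_append,
      List.sum_append, ih]
    have hrow : ((List.flatMap (rowOf S n) [K]).filter (fun c => c.1 == j))
        = if j ∈ List.range n ∧ K < (S.getD j []).length
            then [(j, (S.getD j []).getD K 0)] else [] := by
      rw [show List.flatMap (rowOf S n) [K] = rowOf S n K by simp]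
      exact filter_rowOf_aux S K j (List.range n) List.nodup_range
    rw [hrow]
    by_cases hg : K < (S.getD j []).length
    · rw [if_pos ⟨List.mem_range.mpr hj, hg⟩, sum_take_succ _ _ hg]
      simp
    · rw [if_neg (fun h => hg h.2),
        List.take_of_length_le (by omega), List.take_of_length_le (by omega)]
      simp

-- proof-only shorthands for the two inner passes of the builders
def cpass (L r j m used : Nat) (acc : List (Nat × Nat)) : Nat × List (Nat × Nat) :=
  (List.range' j m).foldl (cellsStep L r) (used, acc)

def gpass (r j m rem : Nat) (c : List (List Nat)) : Nat × List (List Nat) :=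
  (List.range' j m).foldl (bStep r) (rem, c)

theorem foldl_cellsStep_exhausted (L r : Nat) (acc : List (Nat × Nat)) :
    ∀ js : List Nat, js.foldl (cellsStep L r) (L, acc) = (L, acc)
  | [] => rfl
  | j :: js => by
    rw [List.foldl_cons, show cellsStep L r (L, acc) j = (L, acc) by
      unfold cellsStep; rw [if_neg (lt_irrefl L)]]
    exact foldl_cellsStep_exhausted L r acc js

theorem pass_cells (L r : Nat) :
    ∀ (m j used : Nat) (c : List (List Nat)) (acc : List (Nat × Nat)),
      used ≤ L →
      (∀ j', j ≤ j' → j' < j + m → j' < c.length ∧ (c.getD j' []).length = r) →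
      (cpass L r j m used acc).1 ≤ L ∧
      (cpass L r j m used acc).1 + (gpass r j m (L - used) c).1 = L ∧
      (gpass r j m (L - used) c).2.length = c.length ∧
      (∀ j', j' < j ∨ j + m ≤ j' →
        (gpass r j m (L - used) c).2.getD j' [] = c.getD j' []) ∧
      (∀ j', j ≤ j' → j' < j + m →
        ((gpass r j m (L - used) c).2.getD j' []).length = r ∨
        ((gpass r j m (L - used) c).2.getD j' []).length = r + 1) ∧
      (cpass L r j m used acc).2
        = acc ++ (List.range' j m).filterMap (fun j' =>
            if r < ((gpass r j m (L - used) c).2.getD j' []).length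
            then some (j', ((gpass r j m (L - used) c).2.getD j' []).getD r 0)
            else none) ∧
      ((cpass L r j m used acc).1 < L →
        ∀ j', j ≤ j' → j' < j + m →
          ((gpass r j m (L - used) c).2.getD j' []).length = r + 1) ∧
      (used < L → 0 < m →
        ((gpass r j m (L - used) c).2.getD j []).length = r + 1) := by
  intro m
  induction m with
  | zero =>
    intro j used c acc hu _
    refine ⟨hu, by unfold cpass gpass; simp; omega, rfl, fun _ _ => rfl,
      fun j' h1 h2 => absurd h2 (by omega), by unfold cpass; simp,
      fun _ j' h1 h2 => absurd h2 (by omega), fun _ h0 => absurd h0 (by omega)⟩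
  | succ m ih =>
    intro j used c acc hu hcols
    obtain ⟨hjc, hjr⟩ := hcols j (le_refl j) (by omega)
    by_cases hul : used < L
    · -- the head column j receives a cell of size s
      have hsle : Nat.min (1 + (r + j) % 2) (L - used) ≤ L - used := Nat.min_le_right _ _
      have hA : cellsStep L r (used, acc) j
          = (used + Nat.min (1 + (r + j) % 2) (L - used),
             acc ++ [(j, Nat.min (1 + (r + j) % 2) (L - used))]) := by
        unfold cellsStep; rw [if_pos hul]
      have hone : (if (r + j) % 2 = 1 then 2 else 1) = 1 + (r + j) % 2 := by
        rcases Nat.mod_two_eq_zero_or_one (r + j) with h | h <;> simp [h]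
      have hB : bStep r (L - used, c) j
          = (L - (used + Nat.min (1 + (r + j) % 2) (L - used)),
             c.set j (c.getD j [] ++ [Nat.min (1 + (r + j) % 2) (L - used)])) := by
        unfold bStep
        rw [if_pos (by omega : 0 < L - used), hone]
        refine Prod.ext_iff.mpr ⟨?_, rfl⟩
        simp only []
        omega
      have hcpass : cpass L r j (m + 1) used acc
          = cpass L r (j + 1) m (used + Nat.min (1 + (r + j) % 2) (L - used))
              (acc ++ [(j, Nat.min (1 + (r + j) % 2) (L - used))]) := by
        unfold cpass
        rw [List.range'_succ, List.foldl_cons, hA]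
      have hgpass : gpass r j (m + 1) (L - used) c
          = gpass r (j + 1) m (L - (used + Nat.min (1 + (r + j) % 2) (L - used)))
              (c.set j (c.getD j [] ++ [Nat.min (1 + (r + j) % 2) (L - used)])) := by
        unfold gpass
        rw [List.range'_succ, List.foldl_cons, hB]
      have hcols' : ∀ j', j + 1 ≤ j' → j' < j + 1 + m →
          j' < (c.set j (c.getD j [] ++ [Nat.min (1 + (r + j) % 2) (L - used)])).length ∧
          ((c.set j (c.getD j [] ++ [Nat.min (1 + (r + j) % 2) (L - used)])).getD j' []).length
            = r := by
        intro j' h1 h2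
        obtain ⟨e1, e2⟩ := hcols j' (by omega) (by omega)
        exact ⟨by rw [List.length_set]; exact e1,
          by rw [getD_set_ne _ _ _ _ _ (by omega)]; exact e2⟩
      obtain ⟨q1, q2, q3, q4, q5, q6, q7, q8⟩ :=
        ih (j + 1) (used + Nat.min (1 + (r + j) % 2) (L - used))
          (c.set j (c.getD j [] ++ [Nat.min (1 + (r + j) % 2) (L - used)]))
          (acc ++ [(j, Nat.min (1 + (r + j) % 2) (L - used))])
          (by omega) hcols'
      have hGj : (gpass r j (m + 1) (L - used) c).2.getD j []
          = c.getD j [] ++ [Nat.min (1 + (r + j) % 2) (L - used)] := by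
        rw [hgpass, q4 j (Or.inl (by omega)), getD_set_self _ _ _ _ hjc]
      have hGjlen : ((gpass r j (m + 1) (L - used) c).2.getD j []).length = r + 1 := by
        rw [hGj, List.length_append, hjr]
        rfl
      refine ⟨?_, ?_, ?_, ?_, ?_, ?_, ?_, ?_⟩
      · rw [hcpass]; exact q1
      · rw [hcpass, hgpass]; exact q2
      · rw [hgpass, q3]; exact List.length_set ..
      · intro j' hj'
        rw [hgpass, q4 j' (by omega),
          getD_set_ne _ _ _ _ _ (by omega)]
      · intro j' h1 h2
        by_cases hjj : j' = j
        · subst hjj; exact Or.inr hGjlen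
        · rw [hgpass]; exact q5 j' (by omega) (by omega)
      · have hGj' : (gpass r (j + 1) m (L - (used + Nat.min (1 + (r + j) % 2) (L - used)))
            (c.set j (c.getD j [] ++ [Nat.min (1 + (r + j) % 2) (L - used)]))).2.getD j []
            = c.getD j [] ++ [Nat.min (1 + (r + j) % 2) (L - used)] := by
          rw [q4 j (Or.inl (by omega)), getD_set_self _ _ _ _ hjc]
        have hfj' : (fun j' =>
            if r < ((gpass r (j + 1) m (L - (used + Nat.min (1 + (r + j) % 2) (L - used)))
                (c.set j (c.getD j [] ++ [Nat.min (1 + (r + j) % 2) (L - used)]))).2.getD j' []).length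
            then some (j', ((gpass r (j + 1) m (L - (used + Nat.min (1 + (r + j) % 2) (L - used)))
                (c.set j (c.getD j [] ++ [Nat.min (1 + (r + j) % 2) (L - used)]))).2.getD j' []).getD r 0)
            else none) j
            = some (j, Nat.min (1 + (r + j) % 2) (L - used)) := by
          have hv := getD_append_cons (c.getD j []) (Nat.min (1 + (r + j) % 2) (L - used)) [] 0
          rw [hjr] at hv
          simp only []
          rw [hGj', if_pos (by rw [List.length_append, hjr, List.length_singleton]; omega), hv]
        have hrw := List.filterMap_cons_some (f := fun j' =>
            if r < ((gpass r (j + 1) m (L - (used + Nat.min (1 + (r + j) % 2) (L - used)))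
                (c.set j (c.getD j [] ++ [Nat.min (1 + (r + j) % 2) (L - used)]))).2.getD j' []).length
            then some (j', ((gpass r (j + 1) m (L - (used + Nat.min (1 + (r + j) % 2) (L - used)))
                (c.set j (c.getD j [] ++ [Nat.min (1 + (r + j) % 2) (L - used)]))).2.getD j' []).getD r 0)
            else none)
          (a := j) (l := List.range' (j + 1) m) hfj'
        rw [hcpass, q6, hgpass, List.range'_succ, hrw,
          List.append_assoc, List.singleton_append]
      · intro hlt j' h1 h2
        by_cases hjj : j' = j
        · subst hjj; exact hGjlen
        · rw [hgpass]
          rw [hcpass] at hlt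
          exact q7 hlt j' (by omega) (by omega)
      · intro _ _
        exact hGjlen
    · -- used = L: nothing happens in this pass
      have huL : used = L := by omega
      have hcp : cpass L r j (m + 1) used acc = (used, acc) := by
        rw [huL]
        exact foldl_cellsStep_exhausted L r acc _
      have hgp : gpass r j (m + 1) (L - used) c = (0, c) := by
        unfold gpass
        rw [huL, Nat.sub_self]
        exact foldl_bStep_zero r c _
      refine ⟨by rw [hcp]; omega, by rw [hcp, hgp]; simp; omega, by rw [hgp],
        by rw [hgp]; exact fun _ _ => rfl,
        ?_, ?_, ?_, fun h0 => absurd h0 (by omega)⟩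
      · intro j' h1 h2
        rw [hgp]
        exact Or.inl (hcols j' h1 h2).2
      · rw [hcp, hgp]
        have : (List.range' j (m + 1)).filterMap (fun j' =>
            if r < ((c.getD j' [] : List Nat)).length
            then some (j', (c.getD j' []).getD r 0) else none) = [] := by
          apply List.filterMap_eq_nil_iff.mpr
          intro j' hj'
          obtain ⟨hm1, hm2⟩ := List.mem_range'_1.mp hj'
          rw [if_neg (by rw [(hcols j' hm1 (by omega)).2]; omega)]
        rw [this, List.append_nil]
      · intro hlt
        rw [hcp] at hlt
        exact absurd hlt (by omega)

theorem cellsRows_stop (L n : Nat) (acc : List (Nat × Nat)) :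
    ∀ (fuel r : Nat), cellsRows L n fuel r (L, acc) = acc
  | 0, _ => rfl
  | fuel + 1, r => by simp [cellsRows]

theorem bSizes_stop (n : Nat) (c : List (List Nat)) :
    ∀ (fuel r : Nat), bSizes n fuel r (0, c) = c
  | 0, _ => rfl
  | fuel + 1, r => by simp [bSizes]

theorem loop_cells (L n : Nat) (hn : 0 < n) :
    ∀ (fuel r used : Nat) (c : List (List Nat)) (acc : List (Nat × Nat)),
      c.length = n → used ≤ L →
      (∀ j, j < n → (c.getD j []).length = r) →
      cellsRows L n fuel r (used, acc)
        = acc ++ (List.range' r (maxLen (bSizes n fuel r (L - used, c)) - r)).flatMap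
            (rowOf (bSizes n fuel r (L - used, c)) n) := by
  intro fuel
  induction fuel with
  | zero =>
    intro r used c acc hc _ hrow
    have hml : maxLen (bSizes n 0 r (L - used, c)) ≤ r := by
      apply maxLen_le
      intro j hj
      rw [show bSizes n 0 r (L - used, c) = c from rfl] at hj ⊢
      rw [hrow j (by omega)]
    rw [show bSizes n 0 r (L - used, c) = c from rfl] at hml ⊢
    rw [show maxLen c - r = 0 by omega]
    simp [cellsRows]
  | succ f ih =>
    intro r used c acc hc huL hrow
    by_cases hul : used < L
    · have hstepC : cellsRows L n (f + 1) r (used, acc)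
          = cellsRows L n f (r + 1) ((List.range n).foldl (cellsStep L r) (used, acc)) := by
        simp [cellsRows, hul]
      have hstepG : bSizes n (f + 1) r (L - used, c)
          = bSizes n f (r + 1) (bPass n r (L - used, c)) := by
        simp [bSizes, show 0 < L - used by omega]
      obtain ⟨q1, q2, q3, q4, q5, q6, q7, q8⟩ :=
        pass_cells L r n 0 used c acc huL
          (fun j' _ h2 => ⟨by omega, hrow j' (by omega)⟩)
      have hCP : (List.range n).foldl (cellsStep L r) (used, acc) = cpass L r 0 n used acc := by
        unfold cpass
        rw [List.range_eq_range']
      have hGP : bPass n r (L - used, c) = gpass r 0 n (L - used) c := by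
        unfold bPass gpass
        rw [List.range_eq_range']
      have hQ1 : (gpass r 0 n (L - used) c).1 = L - (cpass L r 0 n used acc).1 := by omega
      have hpairC : cpass L r 0 n used acc
          = ((cpass L r 0 n used acc).1, (cpass L r 0 n used acc).2) := rfl
      have hrowdef : (cpass L r 0 n used acc).2
          = acc ++ (List.range' 0 n).filterMap (fun j' =>
              if r < ((gpass r 0 n (L - used) c).2.getD j' []).length
              then some (j', ((gpass r 0 n (L - used) c).2.getD j' []).getD r 0)
              else none) := q6
      rw [hstepC, hstepG, hCP, hGP]
      by_cases hul' : (cpass L r 0 n used acc).1 < L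
      · -- another full row follows
        have hall : ∀ j, j < n →
            (((gpass r 0 n (L - used) c).2).getD j []).length = r + 1 :=
          fun j hj => q7 hul' j (by omega) (by omega)
        have hres := ih (r + 1) (cpass L r 0 n used acc).1 ((gpass r 0 n (L - used) c).2)
          ((cpass L r 0 n used acc).2) (q3.trans hc) (by omega) hall
        have hstate : ((L - (cpass L r 0 n used acc).1 : Nat), (gpass r 0 n (L - used) c).2)
            = gpass r 0 n (L - used) c :=
          Prod.ext_iff.mpr ⟨by omega, rfl⟩
        rw [hstate] at hres
        have hgoalL : cellsRows L n f (r + 1) (cpass L r 0 n used acc)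
            = (cpass L r 0 n used acc).2
              ++ (List.range' (r + 1)
                    (maxLen (bSizes n f (r + 1) (gpass r 0 n (L - used) c)) - (r + 1))).flatMap
                  (rowOf (bSizes n f (r + 1) (gpass r 0 n (L - used) c)) n) := hres
        rw [hgoalL, hrowdef]
        obtain ⟨hext1, hext2⟩ := bSizes_ext n f (r + 1) (gpass r 0 n (L - used) c)
        set F := bSizes n f (r + 1) (gpass r 0 n (L - used) c) with hF
        have hF0 : r + 1 ≤ (F.getD 0 []).length := by
          obtain ⟨suf, hsuf⟩ := hext2 0
          rw [hsuf, List.length_append, hall 0 hn]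
          omega
        have hmlF : r + 1 ≤ maxLen F := by
          have h0F : 0 < F.length := by
            rw [hext1, q3, hc]
            omega
          exact le_trans hF0 (getD_length_le_maxLen F 0 h0F)
        have hsplitR : List.range' r (maxLen F - r)
            = r :: List.range' (r + 1) (maxLen F - (r + 1)) := by
          rw [show maxLen F - r = (maxLen F - (r + 1)) + 1 by omega, List.range'_succ]
        rw [hsplitR, List.flatMap_cons, ← List.append_assoc]
        congr 2
        unfold rowOf
        rw [List.range_eq_range']
        apply List.filterMap_congr
        intro j' hj'
        obtain ⟨hm1, hm2⟩ := List.mem_range'_1.mp hj'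
        obtain ⟨suf, hsuf⟩ := hext2 j'
        have hglen : (((gpass r 0 n (L - used) c).2).getD j' []).length = r + 1 :=
          hall j' (by omega)
        have hFlen : (F.getD j' []).length = r + 1 + suf.length := by
          rw [hsuf, List.length_append, hglen]
        have hFval : (F.getD j' []).getD r 0
            = (((gpass r 0 n (L - used) c).2).getD j' []).getD r 0 := by
          rw [hsuf]
          exact getD_append_left _ _ _ _ (by omega)
        rw [if_pos (by omega), if_pos (by omega), hFval]
      · -- the message ran out inside this row: this was the final (possibly partial) row
        have hPL : (cpass L r 0 n used acc).1 = L := by omega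
        have hCstop : cellsRows L n f (r + 1) (cpass L r 0 n used acc)
            = (cpass L r 0 n used acc).2 := by
          have hstate2 : cpass L r 0 n used acc = ((L : Nat), (cpass L r 0 n used acc).2) :=
            Prod.ext_iff.mpr ⟨hPL, rfl⟩
          rw [hstate2]
          exact cellsRows_stop L n _ f (r + 1)
        have hGstop : bSizes n f (r + 1) (gpass r 0 n (L - used) c)
            = (gpass r 0 n (L - used) c).2 := by
          have hstate3 : gpass r 0 n (L - used) c = ((0 : Nat), (gpass r 0 n (L - used) c).2) :=
            Prod.ext_iff.mpr ⟨by omega, rfl⟩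
          rw [hstate3]
          exact bSizes_stop n _ f (r + 1)
        rw [hCstop, hGstop, hrowdef]
        have hup : maxLen ((gpass r 0 n (L - used) c).2) = r + 1 := by
          apply le_antisymm
          · apply maxLen_le
            intro j hj
            rcases q5 j (by omega) (by rw [q3, hc] at hj; omega) with h | h <;> omega
          · have h0F : 0 < ((gpass r 0 n (L - used) c).2).length := by
              rw [q3, hc]; omega
            have := q8 hul hn
            exact le_trans (by omega) (getD_length_le_maxLen _ 0 h0F)
        rw [hup, show r + 1 - r = 1 by omega, List.range'_one, List.flatMap_cons,
          List.flatMap_nil, List.append_nil]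
        congr 1
        unfold rowOf
        rw [List.range_eq_range']
    · have huL' : used = L := by omega
      subst huL'
      rw [Nat.sub_self, cellsRows_stop, bSizes_stop]
      have hml : maxLen c ≤ r := by
        apply maxLen_le
        intro j hj
        rw [hrow j (by omega)]
      rw [show maxLen c - r = 0 by omega]
      simp

theorem cellsRows_nzero (L : Nat) :
    ∀ (fuel r used : Nat) (acc : List (Nat × Nat)),
      cellsRows L 0 fuel r (used, acc) = acc
  | 0, _, _, _ => rfl
  | fuel + 1, r, used, acc => by
    by_cases h : used < L
    · simp only [cellsRows, if_pos h, List.range_zero, List.foldl_nil]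
      exact cellsRows_nzero L fuel (r + 1) used acc
    · simp [cellsRows, h]

theorem bridge_cells (L n : Nat) :
    cellsRows L n (L + 1) 0 (0, [])
      = (List.range (maxLen (bSizes n (L + 1) 0 (L, List.replicate n [])))).flatMap
          (rowOf (bSizes n (L + 1) 0 (L, List.replicate n [])) n) := by
  by_cases hn : 0 < n
  · have h := loop_cells L n hn (L + 1) 0 0 (List.replicate n []) []
      (List.length_replicate) (Nat.zero_le L)
      (fun j hj => by
        rw [List.getD_eq_getElem _ _ (by simpa using hj)]
        simp)
    rw [Nat.sub_zero] at h
    rw [h, List.nil_append, Nat.sub_zero, List.range_eq_range']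
  · have hn0 : n = 0 := by omega
    subst hn0
    rw [cellsRows_nzero]
    have hS : bSizes 0 (L + 1) 0 (L, List.replicate 0 []) = [] := by
      apply List.length_eq_zero_iff.mp
      rw [(bSizes_ext 0 (L + 1) 0 _).1]
      rfl
    rw [hS]
    rfl

theorem bridge_totals (n : Nat) (S : List (List Nat)) (hS : S.length = n) :
    bTotals n ((List.range (maxLen S)).flatMap (rowOf S n))
      = S.map List.sum := by
  unfold bTotals
  apply List.ext_getElem
  · rw [tot_len, List.length_replicate, List.length_map, hS]
  · intro j h1 h2
    have hjn : j < n := by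
      rw [tot_len, List.length_replicate] at h1
      exact h1
    have hrepl : j < (List.replicate n (0 : Nat)).length := by
      rw [List.length_replicate]; exact hjn
    rw [← List.getD_eq_getElem _ 0 h1, ← List.getD_eq_getElem _ 0 h2,
      tot_getD j _ _ hrepl, colSum_rows S n j hjn (maxLen S),
      List.take_of_length_le (getD_length_le_maxLen S j (by omega)),
      List.getD_eq_getElem _ 0 (by rwa [List.length_replicate]), List.getElem_replicate]
    have hjS : j < S.length := by omega
    rw [List.getD_eq_getElem _ 0 (by rwa [List.length_map]), List.getElem_map,
      ← List.getD_eq_getElem _ [] hjS]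
    omega

-- the two offset folds agree once 'total' carries the column sums of the grid
theorem offs_congr (ks : List Char) (S : List (List Nat)) :
    ∀ (ds : List Int),
      (∀ d ∈ ds, PySem.Chars.find ks (PySem.Int.toStr d).toList ≠ -1 ∧ pIdx ks d < S.length) →
      ∀ (off : List Nat) (pos : Nat),
        ds.foldl (bStartStep ks (S.map List.sum)) (off, pos)
          = ds.foldl (bOffStep ks S) (off, pos) := by
  intro ds
  induction ds with
  | nil => intro _ off pos; rfl
  | cons d rest ih =>
    intro hds off pos
    obtain ⟨hf, hlt⟩ := hds d List.mem_cons_self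
    have hstep : bStartStep ks (S.map List.sum) (off, pos) d = bOffStep ks S (off, pos) d := by
      unfold bStartStep bOffStep
      rw [if_neg hf, if_neg hf]
      simp only [pIdx_def]
      have hmap : (S.map List.sum).getD (pIdx ks d) 0 = (S.getD (pIdx ks d) []).sum := by
        rw [List.getD_eq_getElem _ 0 (by rw [List.length_map]; exact hlt), List.getElem_map,
          ← List.getD_eq_getElem _ [] hlt]
      rw [hmap]
    rw [List.foldl_cons, List.foldl_cons, hstep,
      ih (fun x hx => hds x (List.mem_cons_of_mem _ hx))]

theorem bridge_starts (ks : List Char) (S : List (List Nat)) (hS : S.length = ks.length)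
    (hn9 : ks.length ≤ 9)
    (hdig : ∀ k ∈ List.range ks.length, Char.ofNat (49 + k) ∈ ks) :
    bStarts ks ks.length (S.map List.sum) = bOffsets ks ks.length S := by
  unfold bStarts bOffsets
  rw [offs_congr ks S _
    (fun d hd => ⟨key_find ks hn9 hdig d hd, by rw [hS]; exact (key_at ks hn9 hdig d hd).1⟩)]

theorem foldl_flatMap_eq {α β σ : Type} (g : α → List β) (f : σ → β → σ) :
    ∀ (l : List α) (init : σ),
      (l.flatMap g).foldl f init = l.foldl (fun acc x => (g x).foldl f acc) init := by
  intro l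
  induction l with
  | nil => intro init; rfl
  | cons x t ih =>
    intro init
    rw [List.flatMap_cons, List.foldl_append, List.foldl_cons, ih]

theorem emit_row (msg : List Char) (S : List (List Nat)) (r : Nat) :
    ∀ (js : List Nat) (p : List Nat × List (List Char)),
      ((js.filterMap (fun j =>
          if r < (S.getD j []).length then some (j, (S.getD j []).getD r 0) else none)).foldl
        (bEmitStep msg) p)
      = js.foldl (bCellStep msg S r) p := by
  intro js
  induction js with
  | nil => intro p; rfl
  | cons j t ih =>
    intro p
    rw [List.filterMap_cons]
    by_cases hg : r < (S.getD j []).length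
    · rw [if_pos hg, List.foldl_cons, List.foldl_cons, ih]
      have : bEmitStep msg p (j, (S.getD j []).getD r 0) = bCellStep msg S r p j := by
        unfold bEmitStep bCellStep
        rw [if_pos hg]
      rw [this]
    · rw [if_neg hg, List.foldl_cons, ih]
      have : bCellStep msg S r p j = p := by
        unfold bCellStep
        rw [if_neg hg]
      rw [this]

theorem bridge_emit (msg : List Char) (n : Nat) (S : List (List Nat)) (off : List Nat) :
    (((List.range (maxLen S)).flatMap (rowOf S n)).foldl (bEmitStep msg) (off, [])).2
      = bRead msg n S off := by
  unfold bRead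
  rw [show (S.map List.length).foldl Nat.max 0 = maxLen S from rfl,
    foldl_flatMap_eq (rowOf S n) (bEmitStep msg)]
  have hfn : (fun (acc : List Nat × List (List Char)) (x : Nat) =>
      (rowOf S n x).foldl (bEmitStep msg) acc) = bRowStep msg S n := by
    funext acc x
    unfold bRowStep rowOf
    exact emit_row msg S x (List.range n) acc
  rw [hfn]

theorem alt_eq (ks msg0 : List Char) (hn9 : ks.length ≤ 9)
    (hdig : ∀ k ∈ List.range ks.length, Char.ofNat (49 + k) ∈ ks) :
    ((cellsRows msg0.length ks.length (msg0.length + 1) 0 (0, [])).foldl (bEmitStep msg0)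
        (bStarts ks ks.length
          (bTotals ks.length (cellsRows msg0.length ks.length (msg0.length + 1) 0 (0, []))), [])).2
      = bRead msg0 ks.length
          (bSizes ks.length (msg0.length + 1) 0 (msg0.length, List.replicate ks.length []))
          (bOffsets ks ks.length
            (bSizes ks.length (msg0.length + 1) 0 (msg0.length, List.replicate ks.length []))) := by
  have hSlen : (bSizes ks.length (msg0.length + 1) 0
      (msg0.length, List.replicate ks.length [])).length = ks.length := by
    rw [(bSizes_ext ks.length (msg0.length + 1) 0 _).1]
    exact List.length_replicate
  rw [bridge_cells msg0.length ks.length,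
    bridge_totals ks.length _ hSlen, bridge_starts ks _ hSlen hn9 hdig,
    bridge_emit msg0 ks.length]

-- ===== VERDICT (by name: the statement is the Claim_ definition above) =====
theorem decode_amsco_spec : Claim_equal_decode_amsco := by
  intro message key _ hpre
  unfold Spec_decode_amsco decode_amsco decode_amsco_alt
  have h := main_eq (PySem.Int.toStr key).toList message.toList hpre.1 hpre.2
  have h2 := alt_eq (PySem.Int.toStr key).toList message.toList hpre.1 hpre.2
  simp only []
  rw [h, ← h2]
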